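-- pv_equiv track=rewrite | github.com/iglegui/MinTic2022 | Ciclo1/laminas_marvel.py | cantidad_laminas_cambiables
-- ===== SOURCE A (Python) =====
-- def cantidad_laminas_cambiables(laminas_persona_1, laminas_persona_2):
--
--   counter1 = 0
--   counter2 = 0
--
--   for k in laminas_persona_1:
--     if k not in laminas_persona_2:
--       counter1 += 1
--   for k in laminas_persona_2:
--     if k not in laminas_persona_1:
--       counter2 += 1
--   return (counter1 if counter1 < counter2 else counter2)
-- ===== SOURCE B (Python) =====
-- def cantidad_laminas_cambiables(laminas_persona_1, laminas_persona_2):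
--   s1 = sorted(laminas_persona_1)
--   s2 = sorted(laminas_persona_2)
--   i = j = 0
--   c1 = c2 = 0
--   while i < len(s1) and j < len(s2):
--     if s1[i] < s2[j]:
--       c1 += 1
--       i += 1
--     elif s2[j] < s1[i]:
--       c2 += 1
--       j += 1
--     else:
--       v = s1[i]
--       while i < len(s1) and s1[i] == v:
--         i += 1
--       while j < len(s2) and s2[j] == v:
--         j += 1
--   c1 += len(s1) - i
--   c2 += len(s2) - j
--   return c1 if c1 < c2 else c2
-- ===== Notes on version B (the rewrite author's own statement) =====
-- stated objective: faster
-- what changed: B sorts both lists and counts the exclusive elements of each in one simultaneous two-pointer merge that skips every run of a shared value, instead of A's per-element linear membership scan of the other list.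
import Mathlib
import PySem

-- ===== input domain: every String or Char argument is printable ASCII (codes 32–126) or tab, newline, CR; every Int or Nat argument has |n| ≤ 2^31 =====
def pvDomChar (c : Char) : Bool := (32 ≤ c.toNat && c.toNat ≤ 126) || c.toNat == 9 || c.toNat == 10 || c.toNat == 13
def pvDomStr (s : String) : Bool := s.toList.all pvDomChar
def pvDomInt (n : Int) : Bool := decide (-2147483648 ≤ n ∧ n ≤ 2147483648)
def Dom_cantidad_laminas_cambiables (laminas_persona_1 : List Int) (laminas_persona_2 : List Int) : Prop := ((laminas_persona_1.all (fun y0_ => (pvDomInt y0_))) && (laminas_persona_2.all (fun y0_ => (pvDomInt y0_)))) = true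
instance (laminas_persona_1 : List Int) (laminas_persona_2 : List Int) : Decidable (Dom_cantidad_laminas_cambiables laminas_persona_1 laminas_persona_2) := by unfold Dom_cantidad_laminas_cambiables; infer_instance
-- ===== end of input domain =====

-- B sorts both lists and counts each side's exclusive elements in one two-pointer merge
-- that skips runs of shared values, replacing A's per-element scans (objective: faster).

-- ===== PORT A =====
def cantidad_laminas_cambiables (laminas_persona_1 : List Int) (laminas_persona_2 : List Int) : Int :=
  let counter1 : Int := laminas_persona_1.foldl
    (fun acc k => if ¬ (k ∈ laminas_persona_2) then acc + 1 else acc) 0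
  let counter2 : Int := laminas_persona_2.foldl
    (fun acc k => if ¬ (k ∈ laminas_persona_1) then acc + 1 else acc) 0
  if counter1 < counter2 then counter1 else counter2

-- ===== PORT B =====
-- Source B's merge loop over the two sorted lists: the index pair (i, j) becomes structural
-- recursion on the two remaining suffixes; the two inner skip-loops become dropWhile on
-- the tails (the heads, both equal to v, are dropped by pattern matching); the final
-- `c1 += len(s1) - i` / `c2 += len(s2) - j` are the base cases.
def pvMerge : List Int → List Int → Int × Int
  | [], ys => (0, (ys.length : Int))
  | x :: xs, [] => ((xs.length : Int) + 1, 0)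
  | x :: xs, y :: ys =>
    if x < y then
      let p := pvMerge xs (y :: ys); (p.1 + 1, p.2)
    else if y < x then
      let p := pvMerge (x :: xs) ys; (p.1, p.2 + 1)
    else
      pvMerge (xs.dropWhile (fun z => z == x)) (ys.dropWhile (fun z => z == x))
termination_by xs ys => xs.length + ys.length
decreasing_by
  all_goals
    have h1 := List.length_dropWhile_le (fun z => z == x) xs
    have h2 := List.length_dropWhile_le (fun z => z == x) ys
    simp only [List.length_cons] at h1 h2 ⊢
    omega

def cantidad_laminas_cambiables_alt (laminas_persona_1 : List Int) (laminas_persona_2 : List Int) : Int :=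
  let s1 := PySem.List.sorted laminas_persona_1 (fun x => x) false
  let s2 := PySem.List.sorted laminas_persona_2 (fun x => x) false
  let p := pvMerge s1 s2
  if p.1 < p.2 then p.1 else p.2

-- ===== PRECONDITION & SPEC =====
def Spec_cantidad_laminas_cambiables (laminas_persona_1 : List Int) (laminas_persona_2 : List Int) (out : Int) : Prop := out = cantidad_laminas_cambiables_alt laminas_persona_1 laminas_persona_2
instance (laminas_persona_1 : List Int) (laminas_persona_2 : List Int) (out : Int) : Decidable (Spec_cantidad_laminas_cambiables laminas_persona_1 laminas_persona_2 out) := by unfold Spec_cantidad_laminas_cambiables; infer_instance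

-- ===== CLAIM (what is proved, stated in full; the proofs are below) =====
def Claim_equal_cantidad_laminas_cambiables : Prop := ∀ (laminas_persona_1 : List Int) (laminas_persona_2 : List Int), Dom_cantidad_laminas_cambiables laminas_persona_1 laminas_persona_2 → Spec_cantidad_laminas_cambiables laminas_persona_1 laminas_persona_2 (cantidad_laminas_cambiables laminas_persona_1 laminas_persona_2)

-- ===== LEMMAS AND PROOFS =====
-- in a ≤-sorted list whose elements are all ≥ x, everything left after dropping the
-- leading run of x's is strictly greater than x
lemma pv_dropWhile_gt (x : Int) (l : List Int) (hp : l.Pairwise (· ≤ ·))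
    (hge : ∀ b ∈ l, x ≤ b) :
    ∀ a ∈ l.dropWhile (fun z => z == x), x < a := by
  induction l with
  | nil => simp
  | cons b l ih =>
    by_cases hb : b = x
    · subst hb
      simpa [List.dropWhile] using
        ih hp.of_cons (fun c hc => hge c (List.mem_cons_of_mem _ hc))
    · have hbx : x < b := lt_of_le_of_ne (hge b (by simp)) (Ne.symm hb)
      intro a ha
      rw [List.dropWhile_cons_of_neg (by simpa using hb)] at ha
      rcases List.mem_cons.mp ha with rfl | ha'
      · exact hbx
      · exact lt_of_lt_of_le hbx ((List.pairwise_cons.mp hp).1 a ha')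

-- the merge on two ≤-sorted lists returns exactly the two exclusive-element counts
lemma pvMerge_eq (xs ys : List Int) :
    xs.Pairwise (· ≤ ·) → ys.Pairwise (· ≤ ·) →
    pvMerge xs ys
      = ((xs.countP (fun a => decide (¬ a ∈ ys)) : Int),
         (ys.countP (fun a => decide (¬ a ∈ xs)) : Int)) := by
  induction xs, ys using pvMerge.induct with
  | case1 ys =>
    intro _ _
    simp [pvMerge]
  | case2 x xs =>
    intro _ _
    simp [pvMerge]
  | case3 x xs y ys hlt ih =>
    intro hx hy
    have hxy : ∀ a ∈ y :: ys, x < a := by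
      intro a ha
      rcases List.mem_cons.mp ha with rfl | ha'
      · exact hlt
      · exact lt_of_lt_of_le hlt ((List.pairwise_cons.mp hy).1 a ha')
    rw [pvMerge, if_pos hlt, ih hx.of_cons hy]
    simp only [Prod.mk.injEq]
    refine ⟨?_, ?_⟩
    · have hxnot : ¬ x ∈ y :: ys := fun h => lt_irrefl x (hxy x h)
      rw [List.countP_cons]
      simp [hxnot]
    · norm_cast
      apply List.countP_congr
      intro a ha
      have hax : a ≠ x := fun h => lt_irrefl x (h ▸ hxy a ha)
      simp [hax]
  | case4 x xs y ys hlt hlt2 ih =>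
    intro hx hy
    have hyx : ∀ a ∈ x :: xs, y < a := by
      intro a ha
      rcases List.mem_cons.mp ha with rfl | ha'
      · exact hlt2
      · exact lt_of_lt_of_le hlt2 ((List.pairwise_cons.mp hx).1 a ha')
    rw [pvMerge, if_neg hlt, if_pos hlt2, ih hx hy.of_cons]
    simp only [Prod.mk.injEq]
    refine ⟨?_, ?_⟩
    · norm_cast
      apply List.countP_congr
      intro a ha
      have hay : a ≠ y := fun h => lt_irrefl y (h ▸ hyx a ha)
      simp [hay]
    · have hynot : ¬ y ∈ x :: xs := fun h => lt_irrefl y (hyx y h)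
      rw [List.countP_cons]
      simp [hynot]
  | case5 x xs y ys hlt hlt2 ih =>
    intro hx hy
    have hxy : y = x := le_antisymm (not_lt.mp hlt) (not_lt.mp hlt2)
    subst hxy
    have hgex : ∀ b ∈ xs, y ≤ b := (List.pairwise_cons.mp hx).1
    have hgey : ∀ b ∈ ys, y ≤ b := (List.pairwise_cons.mp hy).1
    have hgtx : ∀ a ∈ xs.dropWhile (fun z => z == y), y < a :=
      pv_dropWhile_gt y xs hx.of_cons hgex
    have hgty : ∀ a ∈ ys.dropWhile (fun z => z == y), y < a :=
      pv_dropWhile_gt y ys hy.of_cons hgey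
    have hpx : (xs.dropWhile (fun z => z == y)).Pairwise (· ≤ ·) :=
      hx.of_cons.sublist (List.dropWhile_sublist _)
    have hpy : (ys.dropWhile (fun z => z == y)).Pairwise (· ≤ ·) :=
      hy.of_cons.sublist (List.dropWhile_sublist _)
    -- one side: countP (· ∉ y :: m) l = countP (· ∉ dropWhile m) (dropWhile l)
    have side : ∀ (l m : List Int), l.Pairwise (· ≤ ·) → (∀ b ∈ l, y ≤ b) →
        (∀ a ∈ m.dropWhile (fun z => z == y), y < a) →
        (l.countP (fun a => decide (¬ a ∈ y :: m)))
          = ((l.dropWhile (fun z => z == y)).countP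
              (fun a => decide (¬ a ∈ m.dropWhile (fun z => z == y)))) := by
      intro l m hpl hgel hgtm
      conv_lhs => rw [← List.takeWhile_append_dropWhile (p := fun z => z == y) (l := l)]
      rw [List.countP_append]
      have htw : (l.takeWhile (fun z => z == y)).countP
          (fun a => decide (¬ a ∈ y :: m)) = 0 := by
        rw [List.countP_eq_zero]
        intro a ha
        have : a = y := by simpa using List.mem_takeWhile_imp ha
        simp [this]
      rw [htw, Nat.zero_add]
      apply List.countP_congr
      intro a ha
      have hay : y < a := pv_dropWhile_gt y l hpl hgel a ha
      have hane : a ≠ y := ne_of_gt hay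
      have hmem : (a ∈ y :: m) ↔ (a ∈ m.dropWhile (fun z => z == y)) := by
        constructor
        · intro h
          rcases List.mem_cons.mp h with rfl | h'
          · exact absurd rfl hane
          · conv at h' => rw [← List.takeWhile_append_dropWhile (p := fun z => z == y) (l := m)]
            rcases List.mem_append.mp h' with h'' | h''
            · exact absurd (by simpa using List.mem_takeWhile_imp h'') hane
            · exact h''
        · intro h
          exact List.mem_cons_of_mem _ ((List.dropWhile_sublist _).mem h)
      simp [hmem]
    have h1 : (List.countP (fun a => decide (¬ a ∈ y :: ys)) (y :: xs))
        = List.countP (fun a => decide (¬ a ∈ ys.dropWhile (fun z => z == y)))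
            (xs.dropWhile (fun z => z == y)) := by
      rw [List.countP_cons]
      simp only [show (decide (¬ y ∈ y :: ys)) = false by simp]
      exact side xs ys hx.of_cons hgex hgty
    have h2 : (List.countP (fun a => decide (¬ a ∈ y :: xs)) (y :: ys))
        = List.countP (fun a => decide (¬ a ∈ xs.dropWhile (fun z => z == y)))
            (ys.dropWhile (fun z => z == y)) := by
      rw [List.countP_cons]
      simp only [show (decide (¬ y ∈ y :: xs)) = false by simp]
      exact side ys xs hy.of_cons hgey hgtx
    rw [pvMerge, if_neg hlt, if_neg hlt2, ih hpx hpy, h1, h2]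

-- ===== VERDICT (by name: the statement is the Claim_ definition above) =====
theorem cantidad_laminas_cambiables_spec : Claim_equal_cantidad_laminas_cambiables := by
  intro l1 l2 _
  unfold Spec_cantidad_laminas_cambiables cantidad_laminas_cambiables cantidad_laminas_cambiables_alt
  dsimp only
  have hp1 : (PySem.List.sorted l1 (fun x => x) false).Pairwise (· ≤ ·) :=
    PySem.List.sorted_pairwise l1 (fun x => x)
  have hp2 : (PySem.List.sorted l2 (fun x => x) false).Pairwise (· ≤ ·) :=
    PySem.List.sorted_pairwise l2 (fun x => x)
  rw [pvMerge_eq _ _ hp1 hp2, PySem.List.foldl_ite_add_one, PySem.List.foldl_ite_add_one]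
  simp [PySem.List.mem_sorted, (PySem.List.sorted_perm l1 (fun x => x) false).countP_eq,
        (PySem.List.sorted_perm l2 (fun x => x) false).countP_eq]
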